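-- pv_equiv track=rewrite | github.com/yousseftarhri/hackerrank_solutions | src/data structure/advanced/x-and-his-shots.py | solve
-- ===== SOURCE A (Python) =====
-- def solve(shots, players):
--     FIELD = int(1e5)
--
--     # Initialize opening and closing arrays
--     opening = [0] * FIELD
--     closing = [0] * FIELD
--
--     # Read ranges for shots
--     for a,b in shots:
--         opening[a] += 1
--         closing[b + 1] += 1
--
--     # Compute cumulative sums for opening and closing arrays
--     for i in range(1, FIELD):
--         opening[i] += opening[i - 1]
--         closing[i] += closing[i - 1]
--
--     # Calculate the total overlapping shots for all players
--     overlapping = 0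
--     for a,b in players:
--         overlapping += opening[b] - closing[a]
--
--
--     return overlapping
-- ===== SOURCE B (Python) =====
-- def solve(shots, players):
--     F = 100000
--     starts = [0] * F
--     ends = [0] * F
--     for a, b in shots:
--         starts[a] += 1
--         ends[b + 1] += 1
--     queries_end = [0] * F
--     queries_start = [0] * F
--     for a, b in players:
--         queries_end[b] += 1
--         queries_start[a] += 1
--     total = 0
--     opened = 0
--     closed = 0
--     for i in range(F):
--         opened += starts[i]
--         closed += ends[i]
--         total += queries_end[i] * opened - queries_start[i] * closed
--     return total
-- ===== Notes on version B (the rewrite author's own statement) =====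
-- stated objective: alternative
-- what changed: Replaces A's two prefix-summed-in-place difference arrays with random-access per-player lookups by an offline counting sweep: player queries are bucketed into two count arrays and a single pass over the field with running opened/closed counters accumulates the answer, never materializing prefix arrays.
import Mathlib
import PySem

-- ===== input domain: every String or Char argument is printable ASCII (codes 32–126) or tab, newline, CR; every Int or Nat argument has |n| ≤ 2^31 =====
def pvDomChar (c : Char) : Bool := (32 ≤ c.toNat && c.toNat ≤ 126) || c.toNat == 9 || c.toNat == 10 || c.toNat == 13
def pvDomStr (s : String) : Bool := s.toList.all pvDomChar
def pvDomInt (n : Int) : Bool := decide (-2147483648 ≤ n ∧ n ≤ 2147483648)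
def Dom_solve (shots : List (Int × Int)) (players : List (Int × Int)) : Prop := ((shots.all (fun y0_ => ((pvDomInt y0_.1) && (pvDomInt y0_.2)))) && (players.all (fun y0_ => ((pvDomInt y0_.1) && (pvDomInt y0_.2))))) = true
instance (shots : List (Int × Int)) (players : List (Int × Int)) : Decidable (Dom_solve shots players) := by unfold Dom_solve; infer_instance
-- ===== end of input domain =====

-- B replaces A's prefix-summed difference arrays plus per-player random-access lookups by an
-- offline counting sweep: player queries are bucketed into count arrays and one field pass with
-- running opened/closed counters accumulates the total (an alternative of the same cost).

-- ===== PORT A =====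
-- Python list index: in-range nonnegative stays, negative wraps by +100000 (list of length 100000).
def pvWrap (i : Int) : Nat := if i < 0 then (i + 100000).toNat else i.toNat

def solve (shots : List (Int × Int)) (players : List (Int × Int)) : Int :=
  let opening : Array Int := Array.replicate 100000 0
  let closing : Array Int := Array.replicate 100000 0
  let oc := shots.foldl (fun (oc : Array Int × Array Int) ab =>
      (oc.1.setIfInBounds (pvWrap ab.1) (oc.1.getD (pvWrap ab.1) 0 + 1),
       oc.2.setIfInBounds (pvWrap (ab.2 + 1)) (oc.2.getD (pvWrap (ab.2 + 1)) 0 + 1)))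
    (opening, closing)
  let oc2 := (PySem.List.pyRange 1 100000 1).foldl (fun (oc : Array Int × Array Int) i =>
      (oc.1.setIfInBounds (pvWrap i) (oc.1.getD (pvWrap i) 0 + oc.1.getD (pvWrap (i - 1)) 0),
       oc.2.setIfInBounds (pvWrap i) (oc.2.getD (pvWrap i) 0 + oc.2.getD (pvWrap (i - 1)) 0)))
    oc
  players.foldl (fun acc ab => acc + (oc2.1.getD (pvWrap ab.2) 0 - oc2.2.getD (pvWrap ab.1) 0)) 0

-- ===== PORT B =====
-- the three loops of Source B, one def each: the shots loop, the players loop, the field-sweep step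
def pvSE (shots : List (Int × Int)) : Array Int × Array Int :=
  shots.foldl (fun (se : Array Int × Array Int) ab =>
      (se.1.setIfInBounds (pvWrap ab.1) (se.1.getD (pvWrap ab.1) 0 + 1),
       se.2.setIfInBounds (pvWrap (ab.2 + 1)) (se.2.getD (pvWrap (ab.2 + 1)) 0 + 1)))
    (Array.replicate 100000 0, Array.replicate 100000 0)

def pvQ (players : List (Int × Int)) : Array Int × Array Int :=
  players.foldl (fun (q : Array Int × Array Int) ab =>
      (q.1.setIfInBounds (pvWrap ab.2) (q.1.getD (pvWrap ab.2) 0 + 1),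
       q.2.setIfInBounds (pvWrap ab.1) (q.2.getD (pvWrap ab.1) 0 + 1)))
    (Array.replicate 100000 0, Array.replicate 100000 0)

def pvSweepStep (se q : Array Int × Array Int) (st : Int × Int × Int) (i : Int) : Int × Int × Int :=
  let opened := st.2.1 + se.1.getD (pvWrap i) 0
  let closed := st.2.2 + se.2.getD (pvWrap i) 0
  (st.1 + q.1.getD (pvWrap i) 0 * opened - q.2.getD (pvWrap i) 0 * closed, opened, closed)

def solve_alt (shots : List (Int × Int)) (players : List (Int × Int)) : Int :=
  let se := pvSE shots
  let q := pvQ players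
  let st := (PySem.List.pyRange 0 100000 1).foldl (pvSweepStep se q) (0, 0, 0)
  st.1

-- ===== PRECONDITION & SPEC =====
-- Pre_ is exactly A's non-raising domain: every used index (shot a and b+1, player a and b)
-- must lie in [-100000, 100000), the valid (wrapping) index range of A's length-100000 lists;
-- outside it A raises IndexError.
def Pre_solve (shots : List (Int × Int)) (players : List (Int × Int)) : Prop :=
  (∀ s ∈ shots, -100000 ≤ s.1 ∧ s.1 < 100000 ∧ -100000 ≤ s.2 + 1 ∧ s.2 + 1 < 100000) ∧
  (∀ p ∈ players, -100000 ≤ p.1 ∧ p.1 < 100000 ∧ -100000 ≤ p.2 ∧ p.2 < 100000)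
instance (shots : List (Int × Int)) (players : List (Int × Int)) : Decidable (Pre_solve shots players) := by unfold Pre_solve; infer_instance

def pvWitness_solve : (List (Int × Int)) × (List (Int × Int)) := ([(2, 5), (0, 3)], [(1, 4), (4, 99999)])

def Spec_solve (shots : List (Int × Int)) (players : List (Int × Int)) (out : Int) : Prop := out = solve_alt shots players
instance (shots : List (Int × Int)) (players : List (Int × Int)) (out : Int) : Decidable (Spec_solve shots players out) := by unfold Spec_solve; infer_instance

-- ===== CLAIM (what is proved, stated in full; the proofs are below) =====
def Claim_equal_solve : Prop := ∀ (shots : List (Int × Int)) (players : List (Int × Int)), Dom_solve shots players → Pre_solve shots players → Spec_solve shots players (solve shots players)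

-- ===== LEMMAS AND PROOFS =====

theorem pvGetD_set (a : Array Int) (i j : Nat) (v : Int) :
    (a.setIfInBounds i v).getD j 0 = if i = j ∧ j < a.size then v else a.getD j 0 := by
  simp [Array.getD, Array.size_setIfInBounds]
  split_ifs <;> simp_all [Array.getElem_setIfInBounds] <;> omega

theorem pvGetD_replicate (j : Nat) :
    (Array.replicate 100000 (0:Int)).getD j 0 = 0 := by
  simp [Array.getD]

theorem pv_fold_pair_split {α : Type} (l : List α) (f g : Array Int → α → Array Int)
    (o c : Array Int) :
    l.foldl (fun oc x => (f oc.1 x, g oc.2 x)) (o, c) = (l.foldl f o, l.foldl g c) := by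
  induction l generalizing o c with
  | nil => rfl
  | cons x t ih => simp [List.foldl, ih]

theorem pv_shot_size (l : List (Int × Int)) (key : Int × Int → Int) (a : Array Int) :
    (l.foldl (fun arr s => arr.setIfInBounds (pvWrap (key s)) (arr.getD (pvWrap (key s)) 0 + 1)) a).size = a.size := by
  induction l generalizing a with
  | nil => rfl
  | cons x t ih => rw [List.foldl_cons, ih, Array.size_setIfInBounds]

def pvWrapI (c : Int) : Int := if c < 0 then c + 100000 else c

theorem pvWrapI_bounds (c : Int) (h1 : -100000 ≤ c) (h2 : c < 100000) :
    0 ≤ pvWrapI c ∧ pvWrapI c < 100000 := by unfold pvWrapI; split_ifs <;> omega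

theorem pv_shotFold_getD (l : List (Int × Int)) (key : Int × Int → Int)
    (h : ∀ s ∈ l, -100000 ≤ key s ∧ key s < 100000) (a : Array Int) (ha : a.size = 100000)
    (j : Nat) (hj : j < 100000) :
    (l.foldl (fun arr s => arr.setIfInBounds (pvWrap (key s)) (arr.getD (pvWrap (key s)) 0 + 1)) a).getD j 0
      = a.getD j 0 + (l.countP (fun s => pvWrapI (key s) == (j:Int)) : Int) := by
  induction l generalizing a with
  | nil => simp
  | cons x t ih =>
    have hx := h x (by simp)
    have hxb := pvWrapI_bounds (key x) hx.1 hx.2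
    have hw : pvWrap (key x) = (pvWrapI (key x)).toNat := by
      unfold pvWrap pvWrapI; split_ifs <;> omega
    rw [List.foldl_cons, ih (fun s hs => h s (by simp [hs])) _ (by simp [Array.size_setIfInBounds, ha])]
    rw [pvGetD_set, List.countP_cons]
    simp only [ha, hw]
    by_cases hkey : pvWrapI (key x) = (j:Int)
    · have : (pvWrapI (key x)).toNat = j := by omega
      simp [hkey, this, hj]
      push_cast; ring
    · have : (pvWrapI (key x)).toNat ≠ j := by omega
      simp [hkey, this]

def pvPrefStep (a : Array Int) (i : Int) : Array Int :=
  a.setIfInBounds (pvWrap i) (a.getD (pvWrap i) 0 + a.getD (pvWrap (i - 1)) 0)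

theorem pv_pref_size (M : Nat) (a : Array Int) :
    ((PySem.List.pyRange 1 M 1).foldl pvPrefStep a).size = a.size := by
  induction M generalizing a with
  | zero => rfl
  | succ n ih =>
    by_cases hn : 1 ≤ n
    · rw [show ((n+1 : Nat):Int) = (n:Int) + 1 by push_cast; ring,
        PySem.List.pyRange_one_succ_right (by exact_mod_cast hn), List.foldl_append]
      simp [pvPrefStep, Array.size_setIfInBounds, ih]
    · interval_cases n <;> simp [PySem.List.pyRange, pvPrefStep, Array.size_setIfInBounds]

theorem pv_prefFold_getD (M : Nat) (a : Array Int) (ha : a.size = 100000) :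
    M ≤ 100000 → ∀ j : Nat, j < 100000 →
    ((PySem.List.pyRange 1 M 1).foldl pvPrefStep a).getD j 0
      = if j < M then (∑ t ∈ Finset.range (j+1), a.getD t 0) else a.getD j 0 := by
  induction M with
  | zero => intro _ j hj; simp
  | succ n ih =>
    intro hM j hj
    by_cases hn : 1 ≤ n
    · rw [show ((n+1 : Nat):Int) = (n:Int) + 1 by push_cast; ring,
        PySem.List.pyRange_one_succ_right (by exact_mod_cast hn), List.foldl_append,
        List.foldl_cons, List.foldl_nil]
      have hsz : ((PySem.List.pyRange 1 n 1).foldl pvPrefStep a).size = 100000 := by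
        rw [pv_pref_size, ha]
      have hwn : pvWrap (n:Int) = n := by unfold pvWrap; split_ifs <;> omega
      have hwn1 : pvWrap ((n:Int) - 1) = n - 1 := by unfold pvWrap; split_ifs <;> omega
      rw [pvPrefStep, hwn, hwn1, pvGetD_set, hsz]
      have ihn := fun (j : Nat) (hj : j < 100000) => ih (by omega) j hj
      by_cases hjn : n = j
      · rw [← hjn] at hj ⊢
        rw [if_pos ⟨rfl, hj⟩, ihn n hj, ihn (n-1) (by omega)]
        rw [if_neg (by omega : ¬ (n < n)), if_pos (by omega : n - 1 < n)]
        rw [if_pos (by omega : n < n + 1)]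
        have h4 : n - 1 + 1 = n := by omega
        rw [h4, Finset.sum_range_succ]
        ring
      · rw [if_neg (by tauto), ihn j hj]
        by_cases h3 : j < n
        · rw [if_pos h3, if_pos (by omega)]
        · rw [if_neg h3, if_neg (by omega)]
    · have hn0 : n = 0 := by omega
      subst hn0
      have : PySem.List.pyRange 1 1 1 = [] := PySem.List.pyRange_one_eq_nil (by norm_num)
      rw [show ((1:Nat):Int) = 1 by norm_num, this, List.foldl_nil]
      by_cases hj0 : j = 0
      · subst hj0; simp
      · rw [if_neg (by omega)]

theorem pv_sum_countP (l : List (Int × Int)) (key : Int × Int → Int)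
    (h : ∀ s ∈ l, 0 ≤ key s) (j : Nat) :
    ∑ t ∈ Finset.range (j+1), (l.countP (fun s => key s == (t:Int)) : Int)
      = l.countP (fun s => decide (key s ≤ (j:Int))) := by
  induction l with
  | nil => simp
  | cons x t ih =>
    have hx := h x (by simp)
    have iht := ih (fun s hs => h s (by simp [hs]))
    simp only [List.countP_cons]
    push_cast
    rw [Finset.sum_add_distrib, iht]
    have heq : ∀ t' ∈ Finset.range (j+1),
        (if (key x == (t':Int)) = true then (1:Int) else 0) = if t' = (key x).toNat then 1 else 0 := by
      intro t' _
      by_cases hc : key x = (t':Int)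
      · rw [if_pos (by simpa using hc), if_pos (by omega)]
      · rw [if_neg (by simpa using hc), if_neg (by omega)]
    rw [Finset.sum_congr rfl heq, Finset.sum_ite_eq' (Finset.range (j+1)) ((key x).toNat) (fun _ => (1:Int))]
    by_cases hm : key x ≤ (j:Int)
    · rw [if_pos (by simp; omega), if_pos (by simpa using hm)]
    · rw [if_neg (by simp; omega), if_neg (by simpa using hm)]

theorem pv_foldl_lambda_pref (a : Array Int) (l : List Int) :
    List.foldl (fun (a : Array Int) (i : Int) =>
      a.setIfInBounds (pvWrap i) (a.getD (pvWrap i) 0 + a.getD (pvWrap (i - 1)) 0)) a l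
    = List.foldl pvPrefStep a l := rfl

theorem pv_foldl_add_congr {α : Type} (l : List α) (f g : α → Int)
    (h : ∀ p ∈ l, f p = g p) (acc : Int) :
    l.foldl (fun a p => a + f p) acc = l.foldl (fun a p => a + g p) acc := by
  induction l generalizing acc with
  | nil => rfl
  | cons x t ih =>
    rw [List.foldl_cons, List.foldl_cons, h x (by simp), ih (fun p hp => h p (by simp [hp]))]

theorem pv_foldl_eq_sum {α : Type} (l : List α) (g : α → Int) (c : Int) :
    l.foldl (fun a p => a + g p) c = c + (l.map g).sum := by
  induction l generalizing c with
  | nil => simp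
  | cons x t ih => rw [List.foldl_cons, ih]; simp; ring

theorem pv_map_sum_sub {α : Type} (l : List α) (g1 g2 : α → Int) :
    (l.map (fun p => g1 p - g2 p)).sum = (l.map g1).sum - (l.map g2).sum := by
  induction l with
  | nil => simp
  | cons x t ih => simp [ih]; ring

theorem pv_swap_sum (l : List (Int × Int)) (key : Int × Int → Int)
    (h : ∀ p ∈ l, 0 ≤ key p ∧ key p < 100000) (f : Nat → Int) :
    ∑ i ∈ Finset.range 100000, (l.countP (fun p => key p == (i:Int)) : Int) * f i
      = (l.map (fun p => f (key p).toNat)).sum := by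
  induction l with
  | nil => simp
  | cons x t ih =>
    have hx := h x (by simp)
    have iht := ih (fun p hp => h p (by simp [hp]))
    simp only [List.countP_cons, List.map_cons, List.sum_cons]
    push_cast
    have hsplit : ∀ i ∈ Finset.range 100000,
        ((t.countP (fun p => key p == (i:Int)) : Int) + (if (key x == (i:Int)) = true then (1:Int) else 0)) * f i
          = (t.countP (fun p => key p == (i:Int)) : Int) * f i + (if i = (key x).toNat then f i else 0) := by
      intro i _
      by_cases hc : key x = (i:Int)
      · rw [if_pos (by simpa using hc), if_pos (by omega)]; ring
      · rw [if_neg (by simpa using hc), if_neg (by omega)]; ring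
    rw [Finset.sum_congr rfl hsplit, Finset.sum_add_distrib, iht,
      Finset.sum_ite_eq' (Finset.range 100000) ((key x).toNat) f,
      if_pos (by simp; omega)]
    ring

theorem pv_solve_char (shots players : List (Int × Int)) (hpre : Pre_solve shots players) :
    solve shots players = players.foldl (fun acc p =>
      acc + ((shots.countP (fun s => decide (pvWrapI s.1 ≤ pvWrapI p.2)) : Int)
           - (shots.countP (fun s => decide (pvWrapI (s.2 + 1) ≤ pvWrapI p.1)) : Int))) 0 := by
  obtain ⟨hsh, hpl⟩ := hpre
  simp only [solve]
  rw [pv_fold_pair_split shots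
      (fun arr s => arr.setIfInBounds (pvWrap s.1) (arr.getD (pvWrap s.1) 0 + 1))
      (fun arr s => arr.setIfInBounds (pvWrap (s.2 + 1)) (arr.getD (pvWrap (s.2 + 1)) 0 + 1))]
  rw [pv_fold_pair_split (PySem.List.pyRange 1 100000 1)
      (fun a i => a.setIfInBounds (pvWrap i) (a.getD (pvWrap i) 0 + a.getD (pvWrap (i - 1)) 0))
      (fun a i => a.setIfInBounds (pvWrap i) (a.getD (pvWrap i) 0 + a.getD (pvWrap (i - 1)) 0))]
  rw [pv_foldl_lambda_pref, pv_foldl_lambda_pref]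
  rw [pv_foldl_add_congr players _
      (fun p => (shots.countP (fun s => decide (pvWrapI s.1 ≤ pvWrapI p.2)) : Int)
              - (shots.countP (fun s => decide (pvWrapI (s.2 + 1) ≤ pvWrapI p.1)) : Int))
      ?_ 0]
  intro p hp
  obtain ⟨hp1, hp2, hp3, hp4⟩ := hpl p hp
  have hpb := pvWrapI_bounds p.2 hp3 hp4
  have hpa := pvWrapI_bounds p.1 hp1 hp2
  have hszo : (shots.foldl (fun arr s => arr.setIfInBounds (pvWrap s.1) (arr.getD (pvWrap s.1) 0 + 1)) (Array.replicate 100000 (0:Int))).size = 100000 := by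
    have h := pv_shot_size shots (fun s => s.1) (Array.replicate 100000 (0:Int))
    simpa using h
  have hszc : (shots.foldl (fun arr s => arr.setIfInBounds (pvWrap (s.2+1)) (arr.getD (pvWrap (s.2+1)) 0 + 1)) (Array.replicate 100000 (0:Int))).size = 100000 := by
    have h := pv_shot_size shots (fun s => s.2 + 1) (Array.replicate 100000 (0:Int))
    simpa using h
  have hwb : pvWrap p.2 = (pvWrapI p.2).toNat := by unfold pvWrap pvWrapI; split_ifs <;> omega
  have hwa : pvWrap p.1 = (pvWrapI p.1).toNat := by unfold pvWrap pvWrapI; split_ifs <;> omega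
  have hjb : (pvWrapI p.2).toNat < 100000 := by omega
  have hja : (pvWrapI p.1).toNat < 100000 := by omega
  dsimp only
  rw [show (100000:Int) = ((100000:Nat):Int) from by norm_num]
  rw [hwb, hwa,
    pv_prefFold_getD 100000 _ hszo (le_refl _) (pvWrapI p.2).toNat hjb,
    pv_prefFold_getD 100000 _ hszc (le_refl _) (pvWrapI p.1).toNat hja,
    if_pos hjb, if_pos hja]
  have hb : ∑ t ∈ Finset.range ((pvWrapI p.2).toNat + 1),
      (shots.foldl (fun arr s => arr.setIfInBounds (pvWrap s.1) (arr.getD (pvWrap s.1) 0 + 1)) (Array.replicate 100000 0)).getD t 0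
      = (shots.countP (fun s => decide (pvWrapI s.1 ≤ pvWrapI p.2)) : Int) := by
    rw [Finset.sum_congr rfl (fun t ht => by
      rw [pv_shotFold_getD shots (fun s => s.1) (fun s hs => ⟨(hsh s hs).1, (hsh s hs).2.1⟩) _ (by simp) t
        (by simp at ht; omega), pvGetD_replicate, zero_add])]
    rw [pv_sum_countP shots (fun s => pvWrapI s.1)
      (fun s hs => (pvWrapI_bounds s.1 (hsh s hs).1 (hsh s hs).2.1).1) (pvWrapI p.2).toNat]
    congr 1
    apply List.countP_congr
    intro s hs
    have : ((pvWrapI p.2).toNat : Int) = pvWrapI p.2 := by omega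
    rw [this]
  have hc : ∑ t ∈ Finset.range ((pvWrapI p.1).toNat + 1),
      (shots.foldl (fun arr s => arr.setIfInBounds (pvWrap (s.2+1)) (arr.getD (pvWrap (s.2+1)) 0 + 1)) (Array.replicate 100000 0)).getD t 0
      = (shots.countP (fun s => decide (pvWrapI (s.2 + 1) ≤ pvWrapI p.1)) : Int) := by
    rw [Finset.sum_congr rfl (fun t ht => by
      rw [pv_shotFold_getD shots (fun s => s.2 + 1) (fun s hs => ⟨(hsh s hs).2.2.1, (hsh s hs).2.2.2⟩) _ (by simp) t
        (by simp at ht; omega), pvGetD_replicate, zero_add])]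
    rw [pv_sum_countP shots (fun s => pvWrapI (s.2 + 1))
      (fun s hs => (pvWrapI_bounds (s.2 + 1) (hsh s hs).2.2.1 (hsh s hs).2.2.2).1) (pvWrapI p.1).toNat]
    congr 1
    apply List.countP_congr
    intro s hs
    have : ((pvWrapI p.1).toNat : Int) = pvWrapI p.1 := by omega
    rw [this]
  rw [hb, hc]

theorem pv_sweep (se q : Array Int × Array Int) (M : Nat) :
    (PySem.List.pyRange 0 M 1).foldl (pvSweepStep se q) (0, 0, 0)
    = (∑ i ∈ Finset.range M, (q.1.getD i 0 * (∑ t ∈ Finset.range (i+1), se.1.getD t 0)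
          - q.2.getD i 0 * (∑ t ∈ Finset.range (i+1), se.2.getD t 0)),
       ∑ t ∈ Finset.range M, se.1.getD t 0,
       ∑ t ∈ Finset.range M, se.2.getD t 0) := by
  induction M with
  | zero =>
    rw [show ((0:Nat):Int) = 0 by norm_num, PySem.List.pyRange_one_eq_nil (by norm_num)]
    simp
  | succ n ih =>
    rw [show ((n+1 : Nat):Int) = (n:Int) + 1 by push_cast; ring,
      PySem.List.pyRange_one_succ_right (by exact_mod_cast Nat.zero_le n), List.foldl_append,
      List.foldl_cons, List.foldl_nil, ih]
    have hwn : pvWrap (n:Int) = n := by unfold pvWrap; split_ifs <;> omega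
    simp only [pvSweepStep, hwn, Prod.mk.injEq]
    refine ⟨?_, ?_, ?_⟩
    · rw [Finset.sum_range_succ (f := fun i => q.1.getD i 0 * (∑ t ∈ Finset.range (i+1), se.1.getD t 0)
          - q.2.getD i 0 * (∑ t ∈ Finset.range (i+1), se.2.getD t 0)),
        Finset.sum_range_succ (f := fun t => se.1.getD t 0),
        Finset.sum_range_succ (f := fun t => se.2.getD t 0)]
      ring
    · rw [Finset.sum_range_succ]
    · rw [Finset.sum_range_succ]

theorem pv_sweep_field (se q : Array Int × Array Int) :
    (PySem.List.pyRange 0 100000 1).foldl (pvSweepStep se q) (0, 0, 0)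
    = (∑ i ∈ Finset.range 100000, (q.1.getD i 0 * (∑ t ∈ Finset.range (i+1), se.1.getD t 0)
          - q.2.getD i 0 * (∑ t ∈ Finset.range (i+1), se.2.getD t 0)),
       ∑ t ∈ Finset.range 100000, se.1.getD t 0,
       ∑ t ∈ Finset.range 100000, se.2.getD t 0) := by
  have h := pv_sweep se q 100000
  rw [show (((100000:Nat)):Int) = (100000:Int) from by norm_num] at h
  exact h

theorem pvSE_eq (shots : List (Int × Int)) :
    pvSE shots
      = (shots.foldl (fun arr s => arr.setIfInBounds (pvWrap s.1) (arr.getD (pvWrap s.1) 0 + 1)) (Array.replicate 100000 0),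
         shots.foldl (fun arr s => arr.setIfInBounds (pvWrap (s.2+1)) (arr.getD (pvWrap (s.2+1)) 0 + 1)) (Array.replicate 100000 0)) :=
  pv_fold_pair_split shots
    (fun arr s => arr.setIfInBounds (pvWrap s.1) (arr.getD (pvWrap s.1) 0 + 1))
    (fun arr s => arr.setIfInBounds (pvWrap (s.2+1)) (arr.getD (pvWrap (s.2+1)) 0 + 1))
    (Array.replicate 100000 0) (Array.replicate 100000 0)

theorem pvQ_eq (players : List (Int × Int)) :
    pvQ players
      = (players.foldl (fun arr p => arr.setIfInBounds (pvWrap p.2) (arr.getD (pvWrap p.2) 0 + 1)) (Array.replicate 100000 0),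
         players.foldl (fun arr p => arr.setIfInBounds (pvWrap p.1) (arr.getD (pvWrap p.1) 0 + 1)) (Array.replicate 100000 0)) :=
  pv_fold_pair_split players
    (fun arr p => arr.setIfInBounds (pvWrap p.2) (arr.getD (pvWrap p.2) 0 + 1))
    (fun arr p => arr.setIfInBounds (pvWrap p.1) (arr.getD (pvWrap p.1) 0 + 1))
    (Array.replicate 100000 0) (Array.replicate 100000 0)

theorem pv_solve_alt_proj (shots players : List (Int × Int)) :
    solve_alt shots players
      = ((PySem.List.pyRange 0 100000 1).foldl (pvSweepStep (pvSE shots) (pvQ players)) (0, 0, 0)).1 := rfl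

theorem pv_alt_char_sum (shots players : List (Int × Int)) :
    solve_alt shots players
      = ∑ i ∈ Finset.range 100000,
          ((pvQ players).1.getD i 0
            * (∑ t ∈ Finset.range (i+1), (pvSE shots).1.getD t 0)
           - (pvQ players).2.getD i 0
            * (∑ t ∈ Finset.range (i+1), (pvSE shots).2.getD t 0)) := by
  rw [pv_solve_alt_proj, pv_sweep_field (pvSE shots) (pvQ players)]

theorem pv_alt_char (shots players : List (Int × Int)) (hpre : Pre_solve shots players) :
    solve_alt shots players = players.foldl (fun acc p =>
      acc + ((shots.countP (fun s => decide (pvWrapI s.1 ≤ pvWrapI p.2)) : Int)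
           - (shots.countP (fun s => decide (pvWrapI (s.2 + 1) ≤ pvWrapI p.1)) : Int))) 0 := by
  obtain ⟨hsh, hpl⟩ := hpre
  rw [pv_alt_char_sum shots players, pvSE_eq shots, pvQ_eq players]
  dsimp only
  -- rewrite every array read into a countP, then swap the sums
  have hterm : ∀ i ∈ Finset.range 100000,
      ((players.foldl (fun arr p => arr.setIfInBounds (pvWrap p.2) (arr.getD (pvWrap p.2) 0 + 1)) (Array.replicate 100000 0)).getD i 0
        * (∑ t ∈ Finset.range (i+1), (shots.foldl (fun arr s => arr.setIfInBounds (pvWrap s.1) (arr.getD (pvWrap s.1) 0 + 1)) (Array.replicate 100000 0)).getD t 0)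
       - (players.foldl (fun arr p => arr.setIfInBounds (pvWrap p.1) (arr.getD (pvWrap p.1) 0 + 1)) (Array.replicate 100000 0)).getD i 0
        * (∑ t ∈ Finset.range (i+1), (shots.foldl (fun arr s => arr.setIfInBounds (pvWrap (s.2+1)) (arr.getD (pvWrap (s.2+1)) 0 + 1)) (Array.replicate 100000 0)).getD t 0))
      = ((players.countP (fun p => pvWrapI p.2 == (i:Int)) : Int)
           * (shots.countP (fun s => decide (pvWrapI s.1 ≤ (i:Int))) : Int)
        - (players.countP (fun p => pvWrapI p.1 == (i:Int)) : Int)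
           * (shots.countP (fun s => decide (pvWrapI (s.2+1) ≤ (i:Int))) : Int)) := by
    intro i hi
    have hi' : i < 100000 := by simpa using hi
    rw [pv_shotFold_getD players (fun p => p.2) (fun p hp => ⟨(hpl p hp).2.2.1, (hpl p hp).2.2.2⟩) _ (by simp) i hi',
      pv_shotFold_getD players (fun p => p.1) (fun p hp => ⟨(hpl p hp).1, (hpl p hp).2.1⟩) _ (by simp) i hi']
    simp only [pvGetD_replicate, zero_add]
    have e1 : ∀ t ∈ Finset.range (i+1),
        (shots.foldl (fun arr s => arr.setIfInBounds (pvWrap s.1) (arr.getD (pvWrap s.1) 0 + 1)) (Array.replicate 100000 0)).getD t 0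
          = (shots.countP (fun s => pvWrapI s.1 == (t:Int)) : Int) := by
      intro t ht
      rw [pv_shotFold_getD shots (fun s => s.1) (fun s hs => ⟨(hsh s hs).1, (hsh s hs).2.1⟩) _ (by simp) t
        (by simp at ht; omega), pvGetD_replicate, zero_add]
    have e2 : ∀ t ∈ Finset.range (i+1),
        (shots.foldl (fun arr s => arr.setIfInBounds (pvWrap (s.2+1)) (arr.getD (pvWrap (s.2+1)) 0 + 1)) (Array.replicate 100000 0)).getD t 0
          = (shots.countP (fun s => pvWrapI (s.2 + 1) == (t:Int)) : Int) := by
      intro t ht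
      rw [pv_shotFold_getD shots (fun s => s.2 + 1) (fun s hs => ⟨(hsh s hs).2.2.1, (hsh s hs).2.2.2⟩) _ (by simp) t
        (by simp at ht; omega), pvGetD_replicate, zero_add]
    rw [Finset.sum_congr rfl e1, Finset.sum_congr rfl e2]
    rw [pv_sum_countP shots (fun s => pvWrapI s.1)
      (fun s hs => (pvWrapI_bounds s.1 (hsh s hs).1 (hsh s hs).2.1).1) i,
      pv_sum_countP shots (fun s => pvWrapI (s.2 + 1))
      (fun s hs => (pvWrapI_bounds (s.2 + 1) (hsh s hs).2.2.1 (hsh s hs).2.2.2).1) i]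
  rw [Finset.sum_congr rfl hterm, Finset.sum_sub_distrib]
  rw [pv_swap_sum players (fun p => pvWrapI p.2)
      (fun p hp => pvWrapI_bounds p.2 (hpl p hp).2.2.1 (hpl p hp).2.2.2)
      (fun k => (shots.countP (fun s => decide (pvWrapI s.1 ≤ (k:Int))) : Int)),
    pv_swap_sum players (fun p => pvWrapI p.1)
      (fun p hp => pvWrapI_bounds p.1 (hpl p hp).1 (hpl p hp).2.1)
      (fun k => (shots.countP (fun s => decide (pvWrapI (s.2+1) ≤ (k:Int))) : Int))]
  rw [pv_foldl_eq_sum players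
      (fun p => (shots.countP (fun s => decide (pvWrapI s.1 ≤ pvWrapI p.2)) : Int)
              - (shots.countP (fun s => decide (pvWrapI (s.2 + 1) ≤ pvWrapI p.1)) : Int)) 0,
    zero_add, pv_map_sum_sub]
  congr 1
  · apply congrArg
    apply List.map_congr_left
    intro p hp
    have hb := pvWrapI_bounds p.2 (hpl p hp).2.2.1 (hpl p hp).2.2.2
    have : (((pvWrapI p.2).toNat : Nat) : Int) = pvWrapI p.2 := by omega
    rw [this]
  · apply congrArg
    apply List.map_congr_left
    intro p hp
    have hb := pvWrapI_bounds p.1 (hpl p hp).1 (hpl p hp).2.1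
    have : (((pvWrapI p.1).toNat : Nat) : Int) = pvWrapI p.1 := by omega
    rw [this]

-- ===== VERDICT (by name: the statement is the Claim_ definition above) =====
theorem solve_spec : Claim_equal_solve := by
  intro shots players _ hpre
  unfold Spec_solve
  rw [pv_solve_char shots players hpre, pv_alt_char shots players hpre]
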